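-- pv_equiv track=rewrite | github.com/benhchoi/twitter_sentiment_analyzer | util.py | get_error_metrics
-- ===== SOURCE A (Python) =====
-- def get_error_metrics(true_y, pred_y):
--     if len(true_y) != len(pred_y):
--         raise('Invalid dimensions, true_y and pred_y do not match')
--
--     # format: true value but prediction value
--     # zero but positive, zero but negative
--     # positive but negative, negative but positive
--     # positive but zero, negative but zero
--     zbp, zbn, pbn, pbz, nbp, nbz = 0, 0, 0, 0, 0, 0
--     for i, output in enumerate(true_y):
--         prediction = pred_y[i]
--         if prediction == output:
--             continue
--
--         if output == 0:
--             if prediction == 1: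
--                 zbp += 1
--             elif prediction == -1:
--                 zbn += 1
--         elif output == 1:
--             if prediction == -1:
--                 pbn += 1
--             elif prediction == 0:
--                 pbz += 1
--         elif output == -1:
--             if prediction == 1:
--                 nbp += 1
--             elif prediction == 0:
--                 nbz += 1
--
--     return zbp, zbn, pbn, pbz, nbp, nbz
-- ===== SOURCE B (Python) =====
-- def get_error_metrics(true_y, pred_y):
--     if len(true_y) != len(pred_y):
--         raise('Invalid dimensions, true_y and pred_y do not match')
--
--     # divide and conquer: split the pair list in halves, combine six-vectors by addition
--     def go(zs):
--         n = len(zs)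
--         if n == 0:
--             return (0, 0, 0, 0, 0, 0)
--         if n == 1:
--             t, p = zs[0]
--             return (int(t == 0 and p == 1), int(t == 0 and p == -1),
--                     int(t == 1 and p == -1), int(t == 1 and p == 0),
--                     int(t == -1 and p == 1), int(t == -1 and p == 0))
--         mid = n // 2
--         l = go(zs[:mid])
--         r = go(zs[mid:])
--         return tuple(x + y for x, y in zip(l, r))
--
--     return go(list(zip(true_y, pred_y)))
-- ===== Notes on version B (the rewrite author's own statement) =====
-- stated objective: alternative
-- what changed: B replaces A's linear pass with six branch counters by a divide-and-conquer recursion: it zips the lists, splits the pair list in halves, computes the six-vector for each half recursively and combines them by componentwise addition.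
import Mathlib
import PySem

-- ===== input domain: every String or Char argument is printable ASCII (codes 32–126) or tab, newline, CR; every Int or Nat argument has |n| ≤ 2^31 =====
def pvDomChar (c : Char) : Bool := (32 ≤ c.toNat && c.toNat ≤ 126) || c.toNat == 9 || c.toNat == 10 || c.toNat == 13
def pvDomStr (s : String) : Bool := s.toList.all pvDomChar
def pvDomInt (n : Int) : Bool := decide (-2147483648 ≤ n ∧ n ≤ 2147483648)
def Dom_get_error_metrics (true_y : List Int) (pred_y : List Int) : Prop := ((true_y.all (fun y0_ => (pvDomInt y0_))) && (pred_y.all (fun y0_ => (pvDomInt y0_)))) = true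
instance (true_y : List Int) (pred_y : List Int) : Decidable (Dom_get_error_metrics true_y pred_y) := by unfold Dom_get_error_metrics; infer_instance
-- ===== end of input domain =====

-- B replaces A's linear branch-counter loop by a divide-and-conquer recursion over the zipped pairs (halve, recurse, add six-vectors): an alternative algorithm, not faster.


-- ===== PORT A =====
-- the loop body: per-element nested branching over the six accumulators
def pvStepA : (Int × Int × Int × Int × Int × Int) → Int → Int → Int × Int × Int × Int × Int × Int
  | (zbp, zbn, pbn, pbz, nbp, nbz), output, prediction =>
    if prediction == output then (zbp, zbn, pbn, pbz, nbp, nbz)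
    else if output == 0 then
      (if prediction == 1 then (zbp + 1, zbn, pbn, pbz, nbp, nbz)
       else if prediction == -1 then (zbp, zbn + 1, pbn, pbz, nbp, nbz)
       else (zbp, zbn, pbn, pbz, nbp, nbz))
    else if output == 1 then
      (if prediction == -1 then (zbp, zbn, pbn + 1, pbz, nbp, nbz)
       else if prediction == 0 then (zbp, zbn, pbn, pbz + 1, nbp, nbz)
       else (zbp, zbn, pbn, pbz, nbp, nbz))
    else if output == -1 then
      (if prediction == 1 then (zbp, zbn, pbn, pbz, nbp + 1, nbz)
       else if prediction == 0 then (zbp, zbn, pbn, pbz, nbp, nbz + 1)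
       else (zbp, zbn, pbn, pbz, nbp, nbz))
    else (zbp, zbn, pbn, pbz, nbp, nbz)

-- for i, output in enumerate(true_y): prediction = pred_y[i]; …
-- pred_y[i] is ported with pyGetD (default 0): under Pre_ (equal lengths) the index is always in range, so IndexError cannot occur.
def get_error_metrics (true_y : List Int) (pred_y : List Int) : Int × Int × Int × Int × Int × Int :=
  (PySem.List.enumerate true_y).foldl
    (fun s io => pvStepA s io.2 (PySem.List.pyGetD pred_y io.1 0))
    (0, 0, 0, 0, 0, 0)

-- ===== PORT B =====
-- the n == 1 base case: the six indicator values of the single pair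
def pvCell (t p : Int) : Int × Int × Int × Int × Int × Int :=
  ((if t = 0 ∧ p = 1 then 1 else 0), (if t = 0 ∧ p = -1 then 1 else 0),
   (if t = 1 ∧ p = -1 then 1 else 0), (if t = 1 ∧ p = 0 then 1 else 0),
   (if t = -1 ∧ p = 1 then 1 else 0), (if t = -1 ∧ p = 0 then 1 else 0))

-- tuple(x + y for x, y in zip(l, r))
def pvAdd6 : (Int × Int × Int × Int × Int × Int) → (Int × Int × Int × Int × Int × Int) → Int × Int × Int × Int × Int × Int
  | (a, b, c, d, e, f), (a', b', c', d', e', f') => (a + a', b + b', c + c', d + d', e + e', f + f')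

-- def go(zs): split at mid = n // 2, recurse on the two slices, add componentwise
def pvGo : List (Int × Int) → Int × Int × Int × Int × Int × Int
  | [] => (0, 0, 0, 0, 0, 0)
  | [(t, p)] => pvCell t p
  | a :: b :: rest =>
      let zs := a :: b :: rest
      let mid := zs.length / 2
      pvAdd6 (pvGo (zs.take mid)) (pvGo (zs.drop mid))
termination_by zs => zs.length
decreasing_by
  · simp [List.length_take]; omega
  · simp; omega

-- B's length-mismatch raise is outside Pre_, so it is not represented here.
def get_error_metrics_alt (true_y : List Int) (pred_y : List Int) : Int × Int × Int × Int × Int × Int :=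
  pvGo (true_y.zip pred_y)

-- ===== PRECONDITION & SPEC =====
-- Pre_ excludes exactly the inputs where A raises: mismatched lengths (Python A raises on `len(true_y) != len(pred_y)`).
def Pre_get_error_metrics (true_y : List Int) (pred_y : List Int) : Prop :=
  true_y.length = pred_y.length
instance (true_y : List Int) (pred_y : List Int) : Decidable (Pre_get_error_metrics true_y pred_y) := by unfold Pre_get_error_metrics; infer_instance
def pvWitness_get_error_metrics : List Int × List Int := ([0, 1, -1, 1], [1, -1, 0, 1])

def Spec_get_error_metrics (true_y : List Int) (pred_y : List Int) (out : Int × Int × Int × Int × Int × Int) : Prop := out = get_error_metrics_alt true_y pred_y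
instance (true_y : List Int) (pred_y : List Int) (out : Int × Int × Int × Int × Int × Int) : Decidable (Spec_get_error_metrics true_y pred_y out) := by unfold Spec_get_error_metrics; infer_instance

-- ===== CLAIM (what is proved, stated in full; the proofs are below) =====
def Claim_equal_get_error_metrics : Prop := ∀ (true_y : List Int) (pred_y : List Int), Dom_get_error_metrics true_y pred_y → Pre_get_error_metrics true_y pred_y → Spec_get_error_metrics true_y pred_y (get_error_metrics true_y pred_y)

-- ===== LEMMAS AND PROOFS =====

-- the six pair-counts, the common value both programs compute
def pvCounts (zs : List (Int × Int)) : Int × Int × Int × Int × Int × Int :=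
  (zs.count (0, 1), zs.count (0, -1), zs.count (1, -1),
   zs.count (1, 0), zs.count (-1, 1), zs.count (-1, 0))

-- One step of A adds the indicator vector of the pair (output, prediction).
set_option maxHeartbeats 1000000 in
lemma pvStepA_add (a b c d e f o p : Int) :
    pvStepA (a, b, c, d, e, f) o p =
      (a + (if o = 0 ∧ p = 1 then 1 else 0),
       b + (if o = 0 ∧ p = -1 then 1 else 0),
       c + (if o = 1 ∧ p = -1 then 1 else 0),
       d + (if o = 1 ∧ p = 0 then 1 else 0),
       e + (if o = -1 ∧ p = 1 then 1 else 0),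
       f + (if o = -1 ∧ p = 0 then 1 else 0)) := by
  simp only [pvStepA, beq_iff_eq]
  split_ifs <;> simp only [Prod.mk.injEq, and_true, true_and] <;> omega

-- A's fold over enumerate true_y with pred_y[i] equals the same fold over the zipped pairs.
lemma pvFoldA_enum_zip :
    ∀ (t p : List Int) (k : Nat) (full : List Int), full.drop k = p → t.length = p.length →
      ∀ s : Int × Int × Int × Int × Int × Int,
      (PySem.List.enumerate t (k : Int)).foldl
        (fun s io => pvStepA s io.2 (PySem.List.pyGetD full io.1 0)) s
      = (t.zip p).foldl (fun s pr => pvStepA s pr.1 pr.2) s := by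
  intro t
  induction t with
  | nil => intro p k full _ _ s; simp [PySem.List.enumerate]
  | cons o t ih =>
    intro p k full hdrop hlen s
    cases p with
    | nil => simp at hlen
    | cons pr p =>
      have hget : PySem.List.pyGetD full (k : Int) 0 = pr := by
        have h0 : (full.drop k)[0]? = some pr := by simp [hdrop]
        rw [List.getElem?_drop] at h0
        simp only [Nat.add_zero] at h0
        simp [PySem.List.pyGetD_natCast, List.getD, h0]
      have henum : PySem.List.enumerate (o :: t) (k : Int)
          = ((k : Int), o) :: PySem.List.enumerate t ((k : Int) + 1) := by
        simp [PySem.List.enumerate]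
      rw [henum]
      simp only [List.foldl_cons, List.zip_cons_cons, hget]
      have hdrop' : full.drop (k + 1) = p := by
        rw [← List.drop_drop, hdrop]; rfl
      have := ih p (k + 1) full hdrop' (by simpa using hlen)
        (pvStepA s o pr)
      simpa [Nat.cast_add] using this

-- The fold of A's step equals the six pair-counts (shifted by the accumulator).
lemma pvFoldA_counts :
    ∀ (zs : List (Int × Int)) (a b c d e f : Int),
      zs.foldl (fun s pr => pvStepA s pr.1 pr.2) (a, b, c, d, e, f)
      = (a + zs.count (0, 1), b + zs.count (0, -1), c + zs.count (1, -1),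
         d + zs.count (1, 0), e + zs.count (-1, 1), f + zs.count (-1, 0)) := by
  intro zs
  induction zs with
  | nil => intro a b c d e f; simp
  | cons z zs ih =>
    intro a b c d e f
    obtain ⟨o, p⟩ := z
    simp only [List.foldl_cons, pvStepA_add, ih, List.count_cons, beq_iff_eq,
      Prod.mk.injEq]
    refine ⟨?_, ?_, ?_, ?_, ?_, ?_⟩ <;> split_ifs <;> simp_all <;> omega

-- counts are additive under append
lemma pvCounts_append (xs ys : List (Int × Int)) :
    pvCounts (xs ++ ys) = pvAdd6 (pvCounts xs) (pvCounts ys) := by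
  simp [pvCounts, pvAdd6, List.count_append]

-- B's divide-and-conquer computes the six pair-counts.
lemma pvGo_counts : ∀ zs : List (Int × Int), pvGo zs = pvCounts zs := by
  intro zs
  induction zs using pvGo.induct with
  | case1 => simp [pvGo, pvCounts]
  | case2 t p =>
      simp only [pvGo, pvCell, pvCounts, List.count_cons, List.count_nil, beq_iff_eq,
        Prod.mk.injEq]
      refine ⟨?_, ?_, ?_, ?_, ?_, ?_⟩ <;> split_ifs <;> simp_all
  | case3 a b rest zs mid ihl ihr =>
      rw [pvGo]
      rw [ihl, ihr, ← pvCounts_append, List.take_append_drop]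

-- ===== VERDICT (by name: the statement is the Claim_ definition above) =====
theorem get_error_metrics_spec : Claim_equal_get_error_metrics := by
  intro t p _ hpre
  unfold Spec_get_error_metrics get_error_metrics get_error_metrics_alt
  have hz := pvFoldA_enum_zip t p 0 p (by simp) hpre (0, 0, 0, 0, 0, 0)
  simp only [Nat.cast_zero] at hz
  rw [hz, pvFoldA_counts, pvGo_counts]
  simp [pvCounts]
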